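-- pv_equiv track=rewrite | github.com/Aashiq1/TripGenie | app/services/booking_finder.py | _deduplicate_hotel_links
-- ===== SOURCE A (Python) =====
-- from typing import Dict, List, Optional
--
-- def _deduplicate_hotel_links(links: List[Dict]) -> List[Dict]:
--     """Remove duplicate hotel links, keeping highest confidence."""
--     platform_links = {}
--
--     for link in links:
--         platform = link["platform"]
--         if platform not in platform_links:
--             platform_links[platform] = link
--         else:
--             # Keep the one with higher confidence
--             existing = platform_links[platform]
--             if link.get("confidence", "low") > existing.get("confidence", "low"):
--                 platform_links[platform] = link
--
--     return list(platform_links.values())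
-- ===== SOURCE B (Python) =====
-- from typing import Dict, List
--
-- def _deduplicate_hotel_links(links: List[Dict]) -> List[Dict]:
--     """Group links by platform first, then pick each group's best in one reduction."""
--     groups = {}
--     for link in links:
--         groups.setdefault(link["platform"], []).append(link)
--     return [max(g, key=lambda l: l.get("confidence", "low")) for g in groups.values()]
-- ===== Notes on version B (the rewrite author's own statement) =====
-- stated objective: alternative
-- what changed: Replaces A's single online pass that keeps a running best link per platform with a two-pass decomposition: first group all links by platform via setdefault/append, then reduce each group with max(key=confidence), relying on max returning the first maximal element to reproduce A's keep-earliest tie behaviour.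
import Mathlib
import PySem

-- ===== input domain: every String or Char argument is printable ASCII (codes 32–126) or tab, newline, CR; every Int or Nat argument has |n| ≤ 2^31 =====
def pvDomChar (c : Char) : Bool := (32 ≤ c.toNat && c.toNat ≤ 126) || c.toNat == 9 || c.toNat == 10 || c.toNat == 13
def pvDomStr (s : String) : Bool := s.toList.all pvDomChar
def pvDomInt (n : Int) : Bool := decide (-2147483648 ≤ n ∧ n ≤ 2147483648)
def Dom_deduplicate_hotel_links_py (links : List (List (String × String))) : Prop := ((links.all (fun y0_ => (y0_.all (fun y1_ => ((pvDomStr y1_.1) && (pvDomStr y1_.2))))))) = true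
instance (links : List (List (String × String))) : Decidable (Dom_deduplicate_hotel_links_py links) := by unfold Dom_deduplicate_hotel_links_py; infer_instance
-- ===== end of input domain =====

-- B changes the decomposition: instead of A's online running-best dict, B groups all links by
-- platform in one pass and then reduces each group with max (objective: alternative, same cost).

-- link.get(k) / link[k]: first-match lookup in the association list (the dict convention)
def pvLinkGet? (l : List (String × String)) (k : String) : Option String :=
  (l.find? (fun p => p.1 == k)).map (·.2)

-- link.get("confidence", "low")
def pvConf (l : List (String × String)) : String := (pvLinkGet? l "confidence").getD "low"

-- link["platform"]; total stand-in: defaults to "" (Pre_ guarantees the key is present)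
def pvPlat (l : List (String × String)) : String := (pvLinkGet? l "platform").getD ""

-- ===== PORT A =====
-- body of A's for-loop
def pvStepA (d : PySem.Dict String (List (String × String))) (link : List (String × String)) :
    PySem.Dict String (List (String × String)) :=
  match d.get? (pvPlat link) with
  | none => d.insert (pvPlat link) link
  | some existing =>
      if pvConf existing < pvConf link then d.insert (pvPlat link) link else d

def deduplicate_hotel_links_py (links : List (List (String × String))) : List (List (String × String)) :=
  (links.foldl pvStepA PySem.Dict.empty).values

-- ===== PORT B =====
-- body of B's grouping loop: groups.setdefault(link["platform"], []).append(link)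
def pvStepB (g : PySem.Dict String (List (List (String × String)))) (link : List (String × String)) :
    PySem.Dict String (List (List (String × String))) :=
  g.modify (pvPlat link) [] (· ++ [link])

-- max(g, key=lambda l: l.get("confidence", "low")); groups are nonempty so getD never fires
def pvBest (grp : List (List (String × String))) : List (String × String) :=
  (PySem.List.max? grp pvConf).getD []

def deduplicate_hotel_links_py_alt (links : List (List (String × String))) : List (List (String × String)) :=
  ((links.foldl pvStepB PySem.Dict.empty).values).map pvBest

-- ===== PRECONDITION & SPEC =====
-- Pre_: every link has a "platform" key — otherwise Python A raises KeyError at link["platform"].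
def Pre_deduplicate_hotel_links_py (links : List (List (String × String))) : Prop :=
  ∀ link ∈ links, (pvLinkGet? link "platform").isSome = true
instance (links : List (List (String × String))) : Decidable (Pre_deduplicate_hotel_links_py links) := by
  unfold Pre_deduplicate_hotel_links_py; infer_instance

def pvWitness_deduplicate_hotel_links_py : (List (List (String × String))) :=
  [[("platform", "booking"), ("confidence", "high")], [("platform", "booking"), ("confidence", "low")]]

def Spec_deduplicate_hotel_links_py (links : List (List (String × String))) (out : List (List (String × String))) : Prop := out = deduplicate_hotel_links_py_alt links
instance (links : List (List (String × String))) (out : List (List (String × String))) : Decidable (Spec_deduplicate_hotel_links_py links out) := by unfold Spec_deduplicate_hotel_links_py; infer_instance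

-- ===== CLAIM (what is proved, stated in full; the proofs are below) =====
def Claim_equal_deduplicate_hotel_links_py : Prop := ∀ (links : List (List (String × String))), Dom_deduplicate_hotel_links_py links → Pre_deduplicate_hotel_links_py links → Spec_deduplicate_hotel_links_py links (deduplicate_hotel_links_py links)

-- ===== LEMMAS AND PROOFS =====

-- relation between an entry of B's grouping dict and the corresponding entry of A's dict
def pvF (q : String × List (List (String × String))) : String × List (String × String) :=
  (q.1, pvBest q.2)

theorem pvBest_singleton (l : List (String × String)) : pvBest [l] = l := rfl

theorem pvInv (links : List (List (String × String))) :
    ∀ (d : PySem.Dict String (List (String × String)))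
      (g : PySem.Dict String (List (List (String × String)))),
      d.items = g.items.map pvF → g.keys.Nodup → (∀ q ∈ g.items, q.2 ≠ []) →
      (links.foldl pvStepA d).items = ((links.foldl pvStepB g).items).map pvF := by
  induction links with
  | nil => intro d g hR _ _; simpa using hR
  | cons link t ih =>
    intro d g hR hnd hne
    have hkeys : d.keys = g.keys := by
      simp only [PySem.Dict.keys, hR, List.map_map]
      rfl
    have hdnd : d.keys.Nodup := hkeys ▸ hnd
    simp only [List.foldl_cons]
    set p := pvPlat link with hp
    by_cases hc : g.contains p = true
    · -- platform already present
      obtain ⟨grp, hg⟩ : ∃ grp, g.get? p = some grp := by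
        have := PySem.Dict.contains_eq_isSome_get? (d := g) (k := p)
        rw [hc] at this
        exact Option.isSome_iff_exists.mp this.symm
      have hmem : (p, grp) ∈ g.items := PySem.Dict.mem_items_of_get?_eq_some g hg
      have hdget : d.get? p = some (pvBest grp) := by
        have : (p, pvBest grp) ∈ d.items := by
          rw [hR]; exact List.mem_map.mpr ⟨(p, grp), hmem, rfl⟩
        exact PySem.Dict.get?_of_mem_items d this hdnd
      have hgrpne : grp ≠ [] := hne _ hmem
      obtain ⟨m, hm⟩ : ∃ m, PySem.List.max? grp pvConf = some m := by
        rcases h : PySem.List.max? grp pvConf with _ | m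
        · exact absurd ((PySem.List.max?_eq_none_iff grp pvConf).mp h) hgrpne
        · exact ⟨m, rfl⟩
      have hbg : pvBest grp = m := by simp [pvBest, hm]
      have hdc : d.contains p = true := by
        rw [PySem.Dict.contains_eq_isSome_get?, hdget]; rfl
      -- B's step: insert p (grp ++ [link])
      have hBstep : pvStepB g link = g.insert p (grp ++ [link]) := by
        unfold pvStepB PySem.Dict.modify
        rw [← hp, PySem.Dict.getD_of_get?_eq_some g [] hg]
      have hitemsB : (pvStepB g link).items =
          g.items.map (fun q => if q.1 == p then (p, grp ++ [link]) else q) := by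
        rw [hBstep, PySem.Dict.items_insert_of_contains g _ hc]
      -- value of pvBest on the extended group
      have hbext : pvBest (grp ++ [link]) = if pvConf m < pvConf link then link else m := by
        have hm' := hm
        simp only [PySem.List.max?] at hm'
        simp only [pvBest, PySem.List.max?, List.foldl_append, hm', List.foldl_cons,
          List.foldl_nil]
        split_ifs <;> rfl
      -- the unique item of g at key p is (p, grp)
      have huniq : ∀ q ∈ g.items, q.1 = p → q = (p, grp) := by
        intro q hq hq1
        have : g.get? p = some q.2 :=
          (PySem.Dict.get?_eq_some_iff_mem_items g p q.2 hnd).mpr (by rw [← hq1]; exact hq)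
        rw [hg] at this
        cases q
        simp_all
      apply ih
      · -- items relation preserved
        rw [hitemsB]
        rcases lt_or_ge (pvConf m) (pvConf link) with hlt | hge
        · -- A replaces
          have : pvStepA d link = d.insert p link := by
            simp [pvStepA, ← hp, hdget, hbg, hlt]
          rw [this, PySem.Dict.items_insert_of_contains d _ hdc, hR,
            List.map_map, List.map_map]
          apply List.map_congr_left
          intro q hq
          by_cases h1 : q.1 = p
          · simp [pvF, h1, hbext, hlt]
          · simp [pvF, h1]
        · -- A keeps the existing link
          have : pvStepA d link = d := by
            simp [pvStepA, ← hp, hdget, hbg, not_lt.mpr hge]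
          rw [this, hR, List.map_map]
          apply List.map_congr_left
          intro q hq
          by_cases h1 : q.1 = p
          · have hq' : q = (p, grp) := huniq q hq h1
            subst hq'
            simp [pvF, hbext, not_lt.mpr hge, hbg]
          · simp [pvF, h1]
      · -- keys stay Nodup
        rw [hBstep, PySem.Dict.keys_insert_of_contains g _ hc]; exact hnd
      · -- groups stay nonempty
        intro q hq
        rw [hBstep] at hq
        rcases (PySem.Dict.mem_items_insert _ _ _ _).mp hq with h | ⟨h, _⟩
        · subst h; simp
        · exact hne _ h
    · -- new platform
      have hc' : g.contains p = false := by simpa using hc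
      have hdc : d.contains p = false := by
        rw [PySem.Dict.contains_eq_decide_mem_keys, hkeys,
          ← PySem.Dict.contains_eq_decide_mem_keys]
        exact hc'
      have hdget : d.get? p = none := by
        have := PySem.Dict.contains_eq_isSome_get? (d := d) (k := p)
        rw [hdc] at this
        exact Option.not_isSome_iff_eq_none.mp (by rw [← this]; simp)
      have hAstep : pvStepA d link = d.insert p link := by
        simp [pvStepA, ← hp, hdget]
      have hBstep : pvStepB g link = g.insert p [link] := by
        unfold pvStepB PySem.Dict.modify
        rw [← hp, PySem.Dict.getD_of_not_contains g [] hc']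
        rfl
      apply ih
      · rw [hAstep, hBstep, PySem.Dict.items_insert_of_not_contains d _ hdc,
          PySem.Dict.items_insert_of_not_contains g _ hc', hR]
        simp [pvF, pvBest_singleton]
      · rw [hBstep, PySem.Dict.keys_insert_of_not_contains g _ hc']
        exact List.Nodup.append hnd (List.nodup_singleton p)
          (by
            intro a ha hb
            have : a = p := by simpa using hb
            subst this
            exact absurd ((PySem.Dict.contains_iff_mem_keys g p).mpr ha) (by simp [hc']))
      · intro q hq
        rw [hBstep] at hq
        rcases (PySem.Dict.mem_items_insert _ _ _ _).mp hq with h | ⟨h, _⟩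
        · subst h; simp
        · exact hne _ h

-- ===== VERDICT (by name: the statement is the Claim_ definition above) =====
theorem deduplicate_hotel_links_py_spec : Claim_equal_deduplicate_hotel_links_py := by
  intro links _ _
  unfold Spec_deduplicate_hotel_links_py deduplicate_hotel_links_py deduplicate_hotel_links_py_alt
  have h := pvInv links PySem.Dict.empty PySem.Dict.empty (by rfl) (by simp [PySem.Dict.keys, PySem.Dict.empty]) (by simp [PySem.Dict.empty])
  simp only [PySem.Dict.values, h, List.map_map]
  rfl
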